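-- pv_equiv track=rewrite | github.com/Itamarepst/Boggle | utils.py | find_length_n_paths
-- ===== SOURCE A (Python) =====
-- from typing import Iterable
-- from typing import List, Tuple
--
-- Board = List[List[str]]
--
-- Path = List[Tuple[int, int]]
--
-- def creats_sub_words_set(words: set) -> set:
--     """ this function creates a set of all the sub words in the main set"""
--     sub_set = set()
--     for word in words:
--         for i in range(1, len(word) + 1):
--             sub_set.add(word[:i])
--             # Adds all the sub words
--
--     return sub_set
--
-- def creats_square(row, col, board_size):
--     """ this function creates a list of tuples, representing legal cells"""
--     lst_sqr = []
--     for r in range(row - 1, row + 2):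
--         for c in range(col - 1, col + 2):
--             if 0 > r or r >= board_size or 0 > c or c >= board_size:
--                 # Checks that the tuple size is legal
--                 continue
--             else:
--                 tup = (r, c)
--                 lst_sqr.append(tup)
--
--     tup = (row, col)
--     lst_sqr.remove(tup)
--     return lst_sqr
--
-- def create_word(path, board) -> str:
--     """ this function creates a word from a given path in the board"""
--     word: str = ''
--     for tup in path:
--         row, col = tup
--         letter: str = board[row][col]
--         word += letter
--     return word
--
-- def _helper_find_length_n_paths(n, board, old_tup, sub_word, words, paths, move_lst, func):
--     """
--     this function is a helper for 2 functions. it uses backtracking approach,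
--      for finding all valid paths under different constraints
--     """
--     size = len(board)
--     row, col = old_tup[0], old_tup[1]
--     word = create_word(move_lst, board)
--
--     if func == 'path':
--         # Checks if it needs to count the amount of pathes
--         if word in words and len(move_lst) == n:
--             paths.append(move_lst[:])
--             return paths
--
--     elif func == 'words':
--         # Checks if it needs to count the amount of words
--         if word in words and len(word) == n:
--             paths.append(move_lst[:])
--             return paths
--
--     pos_moves = creats_square(row, col, size)
--     # creates
--     for tup in pos_moves:
--         if tup in move_lst:
--             continue
--         move_lst.append(tup)
--         cur_word = create_word(move_lst, board)
--         if cur_word not in sub_word: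
--             move_lst.pop()
--             continue
--
--         _helper_find_length_n_paths(n, board, tup, sub_word, words, paths,
--                                     move_lst, func)
--
--         move_lst.pop()
--
-- def find_length_n_paths(n: int, board: Board, words: Iterable[str]) -> List[
--     Path]:
--     """
--     this function returns a list of all possible paths in length 'n'
--     """
--     if n == 0:
--         return []
--
--     sub_word = creats_sub_words_set(words)
--     size = len(board)
--     paths = []
--     for row in range(size):
--         for col in range(size):
--             _helper_find_length_n_paths(n, board, (row, col), sub_word, words, paths, [(row, col)], 'path')
--     return paths
-- ===== SOURCE B (Python) =====
-- def find_length_n_paths(n, board, words):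
--     """Iterative DFS with an explicit stack instead of recursion."""
--     if n == 0:
--         return []
--     word_set = set(words)
--     prefixes = set()
--     for w in words:
--         for i in range(1, len(w) + 1):
--             prefixes.add(w[:i])
--     size = len(board)
--     deltas = [(-1, -1), (-1, 0), (-1, 1), (0, -1), (0, 1), (1, -1), (1, 0), (1, 1)]
--     results = []
--     stack = [[(r, c)] for r in range(size) for c in range(size)][::-1]
--     while stack:
--         path = stack.pop()
--         word = ''.join(board[r][c] for r, c in path)
--         if word in word_set and len(path) == n:
--             results.append(path)
--             continue
--         r, c = path[-1]
--         ext = []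
--         for dr, dc in deltas:
--             nr, nc = r + dr, c + dc
--             if 0 <= nr < size and 0 <= nc < size and (nr, nc) not in path \
--                     and word + board[nr][nc] in prefixes:
--                 ext.append(path + [(nr, nc)])
--         stack.extend(reversed(ext))
--     return results
-- ===== Notes on version B (the rewrite author's own statement) =====
-- stated objective: faster
-- what changed: Replaces A's recursive backtracking helper (which rebuilds the word from the whole path at every node and generates neighbours by scanning a 3x3 range then removing the centre) by an iterative DFS over an explicit stack of paths that extends the current word by one cell incrementally and generates neighbours from a fixed delta list, pushing them in reverse so pop order reproduces A's left-to-right DFS output exactly.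
import Mathlib
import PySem

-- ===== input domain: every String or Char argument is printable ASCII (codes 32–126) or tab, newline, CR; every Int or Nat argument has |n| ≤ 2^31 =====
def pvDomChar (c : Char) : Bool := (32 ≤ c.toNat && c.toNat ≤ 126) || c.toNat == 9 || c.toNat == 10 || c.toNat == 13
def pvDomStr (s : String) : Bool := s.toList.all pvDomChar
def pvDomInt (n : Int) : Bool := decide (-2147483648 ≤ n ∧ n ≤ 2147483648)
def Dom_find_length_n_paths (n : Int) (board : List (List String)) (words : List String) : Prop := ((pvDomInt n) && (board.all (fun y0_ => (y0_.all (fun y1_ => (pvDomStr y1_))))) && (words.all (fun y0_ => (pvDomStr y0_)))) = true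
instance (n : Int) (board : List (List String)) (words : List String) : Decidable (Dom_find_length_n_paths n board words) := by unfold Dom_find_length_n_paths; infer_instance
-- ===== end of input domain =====

-- B replaces A's recursive backtracking DFS by an iterative DFS over an explicit stack of
-- paths, extending the word incrementally instead of rebuilding it at every node; same value.

-- ===== PORT A =====

-- board[t.1][t.2], as a list of chars; Python raises IndexError outside Pre_, where we
-- default to "" (such inputs are excluded by Pre_find_length_n_paths).
def pvCell (board : List (List String)) (t : Int × Int) : List Char :=
  (((PySem.List.pyGet? board t.1).bind fun row => PySem.List.pyGet? row t.2).getD "").toList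

def creats_sub_words_set (words : List String) : PySem.Set (List Char) :=
  words.foldl (fun s w =>
    (PySem.List.pyRange 1 ((w.toList.length : Int) + 1) 1).foldl
      (fun s i => PySem.Set.add s (PySem.List.slice w.toList none (some i))) s)
    PySem.Set.empty

def creats_square (row col board_size : Int) : List (Int × Int) :=
  let lst :=
    (PySem.List.pyRange (row - 1) (row + 2) 1).foldl (fun acc r =>
      (PySem.List.pyRange (col - 1) (col + 2) 1).foldl (fun acc c =>
        if 0 > r ∨ r ≥ board_size ∨ 0 > c ∨ c ≥ board_size then acc
        else acc ++ [(r, c)]) acc) []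
  (PySem.List.remove? lst (row, col)).getD lst   -- lst.remove((row,col)); never a ValueError at A's call sites

def create_word (path : List (Int × Int)) (board : List (List String)) : List Char :=
  path.foldl (fun w t => w ++ pvCell board t) []

-- A's recursive helper; the Nat fuel only makes the recursion structural (it is never
-- exhausted: a path of distinct in-board cells has length ≤ len(board)^2).
def pvHelperA (fuel : Nat) (n : Int) (board : List (List String)) (old_tup : Int × Int)
    (sub_word : PySem.Set (List Char)) (words : List String)
    (move_lst : List (Int × Int)) : List (List (Int × Int)) :=
  match fuel with
  | 0 => []
  | f + 1 =>
    let size : Int := (board.length : Int)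
    let word := create_word move_lst board
    if (words.map String.toList).contains word ∧ (move_lst.length : Int) = n then [move_lst]
    else
      (creats_square old_tup.1 old_tup.2 size).foldl (fun acc tup =>
        if move_lst.contains tup then acc
        else
          let m2 := move_lst ++ [tup]
          let cur := create_word m2 board
          if !(PySem.Set.contains sub_word cur) then acc
          else acc ++ pvHelperA f n board tup sub_word words m2) []

def find_length_n_paths (n : Int) (board : List (List String)) (words : List String) : List (List (Int × Int)) :=
  if n = 0 then []
  else
    let sub_word := creats_sub_words_set words
    let size : Int := (board.length : Int)
    (PySem.List.pyRange 0 size 1).foldl (fun paths row =>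
      (PySem.List.pyRange 0 size 1).foldl (fun paths col =>
        paths ++ pvHelperA (board.length * board.length + 1) n board (row, col) sub_word words [(row, col)]) paths) []

-- ===== PORT B =====

def pvDeltas : List (Int × Int) := [(-1, -1), (-1, 0), (-1, 1), (0, -1), (0, 1), (1, -1), (1, 0), (1, 1)]

-- ''.join(board[r][c] for r, c in path)
def pvWordB (board : List (List String)) (path : List (Int × Int)) : List Char :=
  (path.map (pvCell board)).flatten

-- B's prefix set, built exactly as in Source B (same loop as A's helper builds it)
def pvPrefixes (words : List String) : PySem.Set (List Char) :=
  words.foldl (fun s w =>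
    (PySem.List.pyRange 1 ((w.toList.length : Int) + 1) 1).foldl
      (fun s i => PySem.Set.add s (PySem.List.slice w.toList none (some i))) s)
    PySem.Set.empty

-- The while-loop of Source B.  The Python stack is popped from the END and extended with
-- reversed(ext); we represent the stack with its TOP at the head of the list, so pop = head
-- and pushing reversed(ext) is 'ext ++ rest'.  Fuel only makes the loop structural.
def pvRunB (fuel : Nat) (n : Int) (board : List (List String)) (size : Int)
    (word_set prefixes : PySem.Set (List Char))
    (stack : List (List (Int × Int))) : List (List (Int × Int)) :=
  match fuel, stack with
  | _, [] => []
  | 0, _ :: _ => []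
  | f + 1, path :: rest =>
    let word := pvWordB board path
    if PySem.Set.contains word_set word ∧ (path.length : Int) = n then
      path :: pvRunB f n board size word_set prefixes rest
    else
      let rc := (PySem.List.pyGet? path (-1)).getD (0, 0)   -- path[-1]
      let ext := pvDeltas.foldl (fun ext d =>
        let nr := rc.1 + d.1
        let nc := rc.2 + d.2
        if (0 ≤ nr ∧ nr < size ∧ 0 ≤ nc ∧ nc < size) ∧ ¬ path.contains (nr, nc) ∧
            PySem.Set.contains prefixes (word ++ pvCell board (nr, nc)) then
          ext ++ [path ++ [(nr, nc)]]
        else ext) []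
      pvRunB f n board size word_set prefixes (ext ++ rest)

def find_length_n_paths_alt (n : Int) (board : List (List String)) (words : List String) : List (List (Int × Int)) :=
  if n = 0 then []
  else
    let word_set := PySem.Set.ofList (words.map String.toList)
    let prefixes := pvPrefixes words
    let size : Int := (board.length : Int)
    -- [[(r, c)] for r in range(size) for c in range(size)][::-1], as a head-at-top stack
    -- (the [::-1] and the head-at-top representation cancel)
    let stack := (PySem.List.pyRange 0 size 1).flatMap (fun r =>
      (PySem.List.pyRange 0 size 1).map (fun c => [(r, c)]))
    pvRunB (board.length * board.length * 9 ^ (board.length * board.length)) n board size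
      word_set prefixes stack

-- ===== PRECONDITION & SPEC =====
-- Pre_ excludes exactly the inputs where A raises IndexError: n ≠ 0 with a board row
-- shorter than len(board) (every cell (r,c), r,c < len(board), is indexed).
def Pre_find_length_n_paths (n : Int) (board : List (List String)) (words : List String) : Prop :=
  n = 0 ∨ ∀ r ∈ board, board.length ≤ r.length
instance (n : Int) (board : List (List String)) (words : List String) : Decidable (Pre_find_length_n_paths n board words) := by unfold Pre_find_length_n_paths; infer_instance

def pvWitness_find_length_n_paths : Int × List (List String) × List String :=
  (2, [["a", "b"], ["c", "d"]], ["ab", "ca", "d"])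

def Spec_find_length_n_paths (n : Int) (board : List (List String)) (words : List String) (out : List (List (Int × Int))) : Prop := out = find_length_n_paths_alt n board words
instance (n : Int) (board : List (List String)) (words : List String) (out : List (List (Int × Int))) : Decidable (Spec_find_length_n_paths n board words out) := by unfold Spec_find_length_n_paths; infer_instance

-- ===== CLAIM (what is proved, stated in full; the proofs are below) =====
def Claim_equal_find_length_n_paths : Prop := ∀ (n : Int) (board : List (List String)) (words : List String), Dom_find_length_n_paths n board words → Pre_find_length_n_paths n board words → Spec_find_length_n_paths n board words (find_length_n_paths n board words)

-- ===== LEMMAS AND PROOFS =====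

-- paths reachable by the search: nonempty, duplicate-free, all cells on the board
def pvInv (board : List (List String)) (p : List (Int × Int)) : Prop :=
  p ≠ [] ∧ p.Nodup ∧ ∀ t ∈ p, 0 ≤ t.1 ∧ t.1 < (board.length : Int) ∧ 0 ≤ t.2 ∧ t.2 < (board.length : Int)

-- the neighbour cells both programs extend a path with, as one canonical list
def pvChildTups (board : List (List String)) (sub : PySem.Set (List Char))
    (path : List (Int × Int)) (r c : Int) : List (Int × Int) :=
  (pvDeltas.map (fun d => (r + d.1, c + d.2))).filter
    (fun t => (decide (0 ≤ t.1 ∧ t.1 < (board.length : Int) ∧ 0 ≤ t.2 ∧ t.2 < (board.length : Int))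
      && !path.contains t) && PySem.Set.contains sub (create_word (path ++ [t]) board))

-- A's DFS from one stack state, with the fuel the top-level call grants
def pvDfs (n : Int) (board : List (List String)) (sub : PySem.Set (List Char))
    (words : List String) (p : List (Int × Int)) : List (List (Int × Int)) :=
  pvHelperA (board.length * board.length + 1) n board ((PySem.List.pyGet? p (-1)).getD (0, 0)) sub words p

theorem pvWordB_eq (board : List (List String)) (p : List (Int × Int)) :
    pvWordB board p = create_word p board := by
  simp [pvWordB, create_word]

theorem create_word_snoc (board : List (List String)) (p : List (Int × Int)) (t : Int × Int) :
    create_word (p ++ [t]) board = create_word p board ++ pvCell board t := by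
  simp [create_word]

theorem pvRange3 (a : Int) : PySem.List.pyRange (a - 1) (a + 2) 1 = [a - 1, a, a + 1] := by
  rw [PySem.List.pyRange_one_cons (by omega), PySem.List.pyRange_one_cons (by omega),
      PySem.List.pyRange_one_cons (by omega), PySem.List.pyRange_one_eq_nil (by omega)]
  norm_num

theorem pvRemove_mid {l1 l2 : List (Int × Int)} {x : Int × Int} (h : x ∉ l1) :
    (PySem.List.remove? (l1 ++ x :: l2) x).getD (l1 ++ x :: l2) = l1 ++ l2 := by
  rw [PySem.List.remove?_eq_some_erase _ _ (by simp)]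
  simp [List.erase_append_right _ (by simpa using h)]

theorem pvSq_eq (row col size : Int) (hr0 : 0 ≤ row) (hr1 : row < size) (hc0 : 0 ≤ col) (hc1 : col < size) :
    creats_square row col size =
      (pvDeltas.map (fun d => (row + d.1, col + d.2))).filter
        (fun t => decide (0 ≤ t.1 ∧ t.1 < size ∧ 0 ≤ t.2 ∧ t.2 < size)) := by
  unfold creats_square
  rw [pvRange3, pvRange3]
  have hinner : ∀ r : Int,
      ∀ acc : List (Int × Int), List.foldl (fun acc c =>
        if 0 > r ∨ r ≥ size ∨ 0 > c ∨ c ≥ size then acc else acc ++ [(r, c)]) acc [col-1, col, col+1]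
      = acc ++ ([col-1, col, col+1].flatMap (fun c => if 0 > r ∨ r ≥ size ∨ 0 > c ∨ c ≥ size then [] else [(r, c)])) := by
    intro r acc
    rw [PySem.List.foldl_congr_mem' _ _ (fun acc c => acc ++ (if 0 > r ∨ r ≥ size ∨ 0 > c ∨ c ≥ size then [] else [(r, c)])) _ (by intro c _ a; by_cases h : (0 > r ∨ r ≥ size ∨ 0 > c ∨ c ≥ size) <;> simp [h])]
    rw [PySem.List.foldl_append_eq_flatMap]
  rw [PySem.List.foldl_congr_mem' _ _ (fun acc r => acc ++ ([col-1, col, col+1].flatMap (fun c => if 0 > r ∨ r ≥ size ∨ 0 > c ∨ c ≥ size then [] else [(r, c)]))) _ (by intro r _ a; exact hinner r a)]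
  rw [PySem.List.foldl_append_eq_flatMap]
  simp only [List.flatMap_cons, List.flatMap_nil, List.nil_append, List.append_nil, List.append_assoc]
  -- name the four boundary flags and resolve all nine conditions
  have e1 : (0 > row - 1 ∨ row - 1 ≥ size ∨ 0 > col - 1 ∨ col - 1 ≥ size) ↔ ¬(1 ≤ row ∧ 1 ≤ col) := by omega
  have e2 : (0 > row - 1 ∨ row - 1 ≥ size ∨ 0 > col ∨ col ≥ size) ↔ ¬(1 ≤ row) := by omega
  have e3 : (0 > row - 1 ∨ row - 1 ≥ size ∨ 0 > col + 1 ∨ col + 1 ≥ size) ↔ ¬(1 ≤ row ∧ col + 1 < size) := by omega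
  have e4 : (0 > row ∨ row ≥ size ∨ 0 > col - 1 ∨ col - 1 ≥ size) ↔ ¬(1 ≤ col) := by omega
  have e6 : (0 > row ∨ row ≥ size ∨ 0 > col + 1 ∨ col + 1 ≥ size) ↔ ¬(col + 1 < size) := by omega
  have e7 : (0 > row + 1 ∨ row + 1 ≥ size ∨ 0 > col - 1 ∨ col - 1 ≥ size) ↔ ¬(row + 1 < size ∧ 1 ≤ col) := by omega
  have e8 : (0 > row + 1 ∨ row + 1 ≥ size ∨ 0 > col ∨ col ≥ size) ↔ ¬(row + 1 < size) := by omega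
  have e9 : (0 > row + 1 ∨ row + 1 ≥ size ∨ 0 > col + 1 ∨ col + 1 ≥ size) ↔ ¬(row + 1 < size ∧ col + 1 < size) := by omega
  rw [if_neg (show ¬(0 > row ∨ row ≥ size ∨ 0 > col ∨ col ≥ size) by omega)]
  rw [if_congr e1 rfl rfl, if_congr e2 rfl rfl, if_congr e3 rfl rfl, if_congr e4 rfl rfl,
      if_congr e6 rfl rfl, if_congr e7 rfl rfl, if_congr e8 rfl rfl,
      if_congr e9 rfl rfl]
  simp only [List.singleton_append]
  rw [show (if ¬(1 ≤ row ∧ 1 ≤ col) then ([] : List (Int × Int)) else [(row - 1, col - 1)]) ++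
      ((if ¬1 ≤ row then ([] : List (Int × Int)) else [(row - 1, col)]) ++
        ((if ¬(1 ≤ row ∧ col + 1 < size) then ([] : List (Int × Int)) else [(row - 1, col + 1)]) ++
          ((if ¬1 ≤ col then ([] : List (Int × Int)) else [(row, col - 1)]) ++
            ((row, col) ::
              ((if ¬col + 1 < size then ([] : List (Int × Int)) else [(row, col + 1)]) ++
                ((if ¬(row + 1 < size ∧ 1 ≤ col) then ([] : List (Int × Int)) else [(row + 1, col - 1)]) ++
                  ((if ¬row + 1 < size then ([] : List (Int × Int)) else [(row + 1, col)]) ++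
                    (if ¬(row + 1 < size ∧ col + 1 < size) then ([] : List (Int × Int)) else [(row + 1, col + 1)])))))))) =
      ((if ¬(1 ≤ row ∧ 1 ≤ col) then ([] : List (Int × Int)) else [(row - 1, col - 1)]) ++
        ((if ¬1 ≤ row then ([] : List (Int × Int)) else [(row - 1, col)]) ++
          ((if ¬(1 ≤ row ∧ col + 1 < size) then ([] : List (Int × Int)) else [(row - 1, col + 1)]) ++
            (if ¬1 ≤ col then ([] : List (Int × Int)) else [(row, col - 1)])))) ++
      ((row, col) ::
        ((if ¬col + 1 < size then ([] : List (Int × Int)) else [(row, col + 1)]) ++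
          ((if ¬(row + 1 < size ∧ 1 ≤ col) then ([] : List (Int × Int)) else [(row + 1, col - 1)]) ++
            ((if ¬row + 1 < size then ([] : List (Int × Int)) else [(row + 1, col)]) ++
              (if ¬(row + 1 < size ∧ col + 1 < size) then ([] : List (Int × Int)) else [(row + 1, col + 1)])))))
    from by simp [List.append_assoc]]
  rw [pvRemove_mid (by
    simp only [List.mem_append, not_or]
    and_intros <;> (split <;> simp <;> omega))]
  simp only [pvDeltas, List.map_cons, List.map_nil, List.filter_cons, List.filter_nil,
    decide_eq_true_eq]
  simp only [show row + (-1 : Int) = row - 1 from by ring, show col + (-1 : Int) = col - 1 from by ring,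
    show row + (0 : Int) = row from by ring, show col + (0 : Int) = col from by ring]
  simp only [show (0 ≤ row - 1 ∧ row - 1 < size ∧ 0 ≤ col - 1 ∧ col - 1 < size) ↔ (1 ≤ row ∧ 1 ≤ col) from by omega,
    show (0 ≤ row - 1 ∧ row - 1 < size ∧ 0 ≤ col ∧ col < size) ↔ (1 ≤ row) from by omega,
    show (0 ≤ row - 1 ∧ row - 1 < size ∧ 0 ≤ col + 1 ∧ col + 1 < size) ↔ (1 ≤ row ∧ col + 1 < size) from by omega,
    show (0 ≤ row ∧ row < size ∧ 0 ≤ col - 1 ∧ col - 1 < size) ↔ (1 ≤ col) from by omega,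
    show (0 ≤ row ∧ row < size ∧ 0 ≤ col + 1 ∧ col + 1 < size) ↔ (col + 1 < size) from by omega,
    show (0 ≤ row + 1 ∧ row + 1 < size ∧ 0 ≤ col - 1 ∧ col - 1 < size) ↔ (row + 1 < size ∧ 1 ≤ col) from by omega,
    show (0 ≤ row + 1 ∧ row + 1 < size ∧ 0 ≤ col ∧ col < size) ↔ (row + 1 < size) from by omega,
    show (0 ≤ row + 1 ∧ row + 1 < size ∧ 0 ≤ col + 1 ∧ col + 1 < size) ↔ (row + 1 < size ∧ col + 1 < size) from by omega]
  by_cases b1 : 1 ≤ row <;> by_cases b2 : row + 1 < size <;>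
    by_cases b3 : 1 ≤ col <;> by_cases b4 : col + 1 < size <;>
  · simp [b1, b2, b3, b4]

theorem pvInv_length_le (board : List (List String)) (p : List (Int × Int))
    (h : pvInv board p) :
    p.length ≤ board.length * board.length := by
  classical
  obtain ⟨-, hnd, hb⟩ := h
  set N := board.length with hN
  have hcard : p.toFinset.card = p.length := List.toFinset_card_of_nodup hnd
  have hinj : Set.InjOn (fun t : Int × Int => (t.1.toNat, t.2.toNat)) p.toFinset := by
    intro x hx y hy hxy
    simp only [List.coe_toFinset, Set.mem_setOf_eq] at hx hy
    obtain ⟨hx1, hx2, hx3, hx4⟩ := hb x hx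
    obtain ⟨hy1, hy2, hy3, hy4⟩ := hb y hy
    have h1 := congrArg Prod.fst hxy
    have h2 := congrArg Prod.snd hxy
    simp only at h1 h2
    exact Prod.ext (by omega) (by omega)
  have himg : p.toFinset.image (fun t : Int × Int => (t.1.toNat, t.2.toNat)) ⊆
      (Finset.range N) ×ˢ (Finset.range N) := by
    intro x hx
    simp only [Finset.mem_image] at hx
    obtain ⟨t, ht, rfl⟩ := hx
    simp only [List.mem_toFinset] at ht
    obtain ⟨h1, h2, h3, h4⟩ := hb t ht
    simp only [Finset.mem_product, Finset.mem_range]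
    omega
  calc p.length = p.toFinset.card := hcard.symm
    _ = (p.toFinset.image (fun t : Int × Int => (t.1.toNat, t.2.toNat))).card :=
        (Finset.card_image_of_injOn hinj).symm
    _ ≤ ((Finset.range N) ×ˢ (Finset.range N)).card := Finset.card_le_card himg
    _ = N * N := by simp

theorem pvFlatMap_filter_if2 {α β : Type} (l : List α) (p A B : α → Bool) (h : α → List β) :
    (l.filter p).flatMap (fun x => if A x then [] else if B x then h x else []) =
      (l.filter (fun x => (p x && !A x) && B x)).flatMap h := by
  induction l with
  | nil => rfl
  | cons x xs ih =>
    by_cases hp : p x <;> by_cases hA : A x <;> by_cases hB : B x <;>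
      simp [hp, hA, hB, ih]

theorem pvHelperA_step (f : Nat) (n : Int) (board : List (List String)) (r c : Int)
    (sub : PySem.Set (List Char)) (words : List String) (move : List (Int × Int))
    (hr0 : 0 ≤ r) (hr1 : r < (board.length : Int)) (hc0 : 0 ≤ c) (hc1 : c < (board.length : Int))
    (hacc : ¬ ((words.map String.toList).contains (create_word move board) ∧ (move.length : Int) = n)) :
    pvHelperA (f + 1) n board (r, c) sub words move =
      (pvChildTups board sub move r c).flatMap (fun t => pvHelperA f n board t sub words (move ++ [t])) := by
  rw [pvHelperA]
  simp only []
  rw [if_neg hacc]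
  rw [PySem.List.foldl_congr_mem' _ _
    (fun acc tup => acc ++ (if move.contains tup then [] else
      if PySem.Set.contains sub (create_word (move ++ [tup]) board) then
        pvHelperA f n board tup sub words (move ++ [tup]) else []))
    _ (by
      intro tup _ acc
      by_cases h1 : tup ∈ move <;>
        by_cases h2 : create_word (move ++ [tup]) board ∈ sub <;>
        simp [h1, h2])]
  rw [PySem.List.foldl_append_eq_flatMap]
  rw [pvSq_eq r c (board.length : Int) hr0 hr1 hc0 hc1]
  rw [pvFlatMap_filter_if2 _ _ (fun t => move.contains t)
    (fun t => PySem.Set.contains sub (create_word (move ++ [t]) board))]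
  rfl

theorem pvMem_childTups {board : List (List String)} {sub : PySem.Set (List Char)}
    {path : List (Int × Int)} {r c : Int} {t : Int × Int} (h : t ∈ pvChildTups board sub path r c) :
    (0 ≤ t.1 ∧ t.1 < (board.length : Int) ∧ 0 ≤ t.2 ∧ t.2 < (board.length : Int)) ∧ t ∉ path := by
  unfold pvChildTups at h
  rw [List.mem_filter] at h
  obtain ⟨-, hcond⟩ := h
  simp only [Bool.and_eq_true, decide_eq_true_eq, Bool.not_eq_true'] at hcond
  refine ⟨hcond.1.1, ?_⟩
  simpa using hcond.1.2

theorem pvInv_child {board : List (List String)} {path : List (Int × Int)} {t : Int × Int}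
    (h : pvInv board path)
    (hb : 0 ≤ t.1 ∧ t.1 < (board.length : Int) ∧ 0 ≤ t.2 ∧ t.2 < (board.length : Int))
    (hn : t ∉ path) : pvInv board (path ++ [t]) := by
  obtain ⟨h1, h2, h3⟩ := h
  refine ⟨by simp, ?_, ?_⟩
  · rw [List.nodup_append]
    refine ⟨h2, List.nodup_singleton _, ?_⟩
    intro a ha b hb
    simp only [List.mem_singleton] at hb
    subst hb
    exact fun he => hn (he ▸ ha)
  · intro u hu
    rcases List.mem_append.1 hu with hu | hu
    · exact h3 u hu
    · simp at hu; subst hu; exact hb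

theorem pvHelperA_fuel (n : Int) (board : List (List String)) (sub : PySem.Set (List Char))
    (words : List String) :
    ∀ (f g : Nat) (move : List (Int × Int)) (old : Int × Int),
      pvInv board move → move.getLast? = some old →
      board.length * board.length + 1 - move.length ≤ f →
      board.length * board.length + 1 - move.length ≤ g →
      pvHelperA f n board old sub words move = pvHelperA g n board old sub words move := by
  intro f
  induction f with
  | zero =>
    intro g move old hinv _ hf _
    have := pvInv_length_le board move hinv
    omega
  | succ f' ih =>
    intro g move old hinv hlast hf hg
    have hlen := pvInv_length_le board move hinv
    obtain ⟨g', rfl⟩ : ∃ g'', g = g'' + 1 := ⟨g - 1, by omega⟩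
    obtain ⟨r, c⟩ := old
    have hmem : (r, c) ∈ move := List.mem_of_getLast? hlast
    obtain ⟨hb1, hb2, hb3, hb4⟩ := hinv.2.2 _ hmem
    by_cases hacc : ((words.map String.toList).contains (create_word move board) ∧ (move.length : Int) = n)
    · rw [pvHelperA, pvHelperA]
      simp only []
      rw [if_pos hacc, if_pos hacc]
    · rw [pvHelperA_step f' n board r c sub words move hb1 hb2 hb3 hb4 hacc,
          pvHelperA_step g' n board r c sub words move hb1 hb2 hb3 hb4 hacc]
      apply List.flatMap_congr
      intro t ht
      obtain ⟨htb, htn⟩ := pvMem_childTups ht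
      exact ih g' (move ++ [t]) t (pvInv_child hinv htb htn) (by simp)
        (by simp; omega) (by simp; omega)

theorem pvSet_contains_ofList {α : Type} [BEq α] [LawfulBEq α] (xs : List α) (y : α) :
    PySem.Set.contains (PySem.Set.ofList xs) y = xs.contains y := by
  simp [pysem]

theorem pvMapFilter_congr {α β : Type} (l : List α) (p q : α → Bool) (f g : α → β)
    (hpq : ∀ x ∈ l, p x = q x) (hfg : ∀ x ∈ l, f x = g x) :
    (l.filter p).map f = (l.filter q).map g := by
  rw [List.filter_congr hpq]
  exact List.map_congr_left (fun x hx => hfg x (List.mem_of_mem_filter hx))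

theorem pvExt_eq (board : List (List String)) (words : List String)
    (path : List (Int × Int)) (r c : Int) :
    pvDeltas.foldl (fun ext d =>
        if (0 ≤ r + d.1 ∧ r + d.1 < (board.length : Int) ∧ 0 ≤ c + d.2 ∧ c + d.2 < (board.length : Int)) ∧
            ¬ path.contains (r + d.1, c + d.2) ∧
            PySem.Set.contains (pvPrefixes words) (pvWordB board path ++ pvCell board (r + d.1, c + d.2)) then
          ext ++ [path ++ [(r + d.1, c + d.2)]]
        else ext) [] =
      (pvChildTups board (creats_sub_words_set words) path r c).map (fun t => path ++ [t]) := by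
  rw [PySem.List.foldl_append_ite]
  rw [List.nil_append]
  unfold pvChildTups
  rw [List.filter_map, List.map_map]
  apply pvMapFilter_congr
  · intro d _
    rw [Bool.eq_iff_iff]
    simp only [Function.comp_apply, decide_eq_true_eq, Bool.and_eq_true, Bool.not_eq_true',
      show pvPrefixes = creats_sub_words_set from rfl, pvWordB_eq, create_word_snoc]
    constructor
    · rintro ⟨hb, hc, hp⟩
      exact ⟨⟨by simpa using hb, by simpa using hc⟩, hp⟩
    · rintro ⟨⟨hb, hc⟩, hp⟩
      exact ⟨by simpa using hb, by simpa using hc, hp⟩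
  · intro d _
    rfl

theorem pvRunB_eq (n : Int) (board : List (List String)) (words : List String) :
    ∀ (f : Nat) (stack : List (List (Int × Int))),
      (∀ p ∈ stack, pvInv board p) →
      (stack.map (fun p => 9 ^ (board.length * board.length + 1 - p.length))).sum ≤ f →
      pvRunB f n board (board.length : Int) (PySem.Set.ofList (words.map String.toList))
          (pvPrefixes words) stack =
        (stack.map (pvDfs n board (creats_sub_words_set words) words)).flatten := by
  intro f
  induction f with
  | zero =>
    intro stack hinv hsum
    cases stack with
    | nil => rfl
    | cons path rest =>
      exfalso
      have h9 : 1 ≤ 9 ^ (board.length * board.length + 1 - path.length) :=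
        Nat.one_le_pow _ _ (by norm_num)
      simp only [List.map_cons, List.sum_cons] at hsum
      omega
  | succ f' ih =>
    intro stack hinv hsum
    cases stack with
    | nil => rfl
    | cons path rest =>
      have hinvp := hinv path (by simp)
      have hlen := pvInv_length_le board path hinvp
      simp only [List.map_cons, List.sum_cons] at hsum
      have h9 : 1 ≤ 9 ^ (board.length * board.length + 1 - path.length) :=
        Nat.one_le_pow _ _ (by norm_num)
      have hword := pvWordB_eq board path
      rw [pvRunB]
      simp only []
      by_cases hacc : ((words.map String.toList).contains (create_word path board) ∧ ((path.length : Int) = n))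
      · rw [if_pos (by rw [hword]; exact ⟨by rw [pvSet_contains_ofList]; exact hacc.1, hacc.2⟩)]
        rw [ih rest (fun p hp => hinv p (by simp [hp])) (by omega)]
        have hdfs : pvDfs n board (creats_sub_words_set words) words path = [path] := by
          rw [pvDfs, pvHelperA]
          simp only []
          rw [if_pos hacc]
        simp [hdfs]
      · rw [if_neg (by rw [hword]; intro hc; exact hacc ⟨by rw [← pvSet_contains_ofList]; exact hc.1, hc.2⟩)]
        -- last cell of the path
        obtain ⟨l0, hlast⟩ : ∃ x, path.getLast? = some x :=
          ⟨path.getLast hinvp.1, List.getLast?_eq_some_getLast hinvp.1⟩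
        have hl0mem := List.mem_of_getLast? hlast
        obtain ⟨r, c⟩ := l0
        obtain ⟨hb1, hb2, hb3, hb4⟩ := hinvp.2.2 _ hl0mem
        simp only [PySem.List.pyGet?_neg_one, hlast, Option.getD_some]
        rw [pvExt_eq board words path r c]
        set K := board.length * board.length with hK
        set sub := creats_sub_words_set words with hsub
        set dfs := pvDfs n board sub words with hdfs
        set ext := (pvChildTups board sub path r c).map (fun t => path ++ [t]) with hext
        -- invariants for the pushed states
        have hinv' : ∀ p ∈ ext ++ rest, pvInv board p := by
          intro p hp
          rcases List.mem_append.1 hp with hp | hp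
          · rw [hext] at hp
            obtain ⟨t, ht, rfl⟩ := List.mem_map.1 hp
            obtain ⟨htb, htn⟩ := pvMem_childTups ht
            exact pvInv_child hinvp htb htn
          · exact hinv p (by simp [hp])
        -- fuel accounting
        have hlen8 : ext.length ≤ 8 := by
          rw [hext, List.length_map]
          calc (pvChildTups board sub path r c).length
              ≤ (pvDeltas.map (fun d => (r + d.1, c + d.2))).length := List.length_filter_le _ _
            _ = 8 := by rw [List.length_map]; rfl
        have hcost : ∀ q ∈ ext.map (fun p => 9 ^ (K + 1 - p.length)), q = 9 ^ (K - path.length) := by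
          intro q hq
          rw [hext, List.map_map] at hq
          obtain ⟨t, -, rfl⟩ := List.mem_map.1 hq
          simp only [Function.comp_apply, List.length_append, List.length_singleton]
          congr 1
          omega
        have hsum_ext : (ext.map (fun p => 9 ^ (K + 1 - p.length))).sum ≤ 8 * 9 ^ (K - path.length) := by
          calc (ext.map (fun p => 9 ^ (K + 1 - p.length))).sum
              ≤ (ext.map (fun p => 9 ^ (K + 1 - p.length))).length * 9 ^ (K - path.length) := by
                apply List.sum_le_card_nsmul
                intro q hq; exact le_of_eq (hcost q hq)
            _ ≤ 8 * 9 ^ (K - path.length) := by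
                rw [List.length_map]
                exact Nat.mul_le_mul_right _ hlen8
        have hsum' : ((ext ++ rest).map (fun p => 9 ^ (K + 1 - p.length))).sum ≤ f' := by
          rw [List.map_append, List.sum_append]
          have hsplit : K + 1 - path.length = (K - path.length) + 1 := by omega
          rw [hsplit, pow_succ] at hsum
          have h1 : 1 ≤ 9 ^ (K - path.length) := Nat.one_le_pow _ _ (by norm_num)
          omega
        rw [ih (ext ++ rest) hinv' hsum']
        -- A's DFS from this state expands to its children
        have hstep : dfs path = (ext.map dfs).flatten := by
          rw [hdfs, pvDfs, PySem.List.pyGet?_neg_one, hlast, Option.getD_some]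
          rw [pvHelperA_step K n board r c sub words path hb1 hb2 hb3 hb4 hacc]
          rw [hext, List.map_map, List.flatMap_def]
          apply congrArg List.flatten
          apply List.map_congr_left
          intro t ht
          obtain ⟨htb, htn⟩ := pvMem_childTups ht
          have hchild := pvInv_child hinvp htb htn
          simp only [Function.comp_apply, pvDfs, PySem.List.pyGet?_neg_one_append_singleton,
            Option.getD_some]
          apply pvHelperA_fuel n board sub words K (K + 1) (path ++ [t]) t hchild (by simp)
          · have := pvInv_length_le board path hinvp
            simp only [List.length_append, List.length_singleton]
            omega
          · have := pvInv_length_le board path hinvp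
            simp only [List.length_append, List.length_singleton]
            omega
        simp only [List.map_append, List.flatten_append, List.map_cons, List.flatten_cons, hstep]

-- ===== VERDICT (by name: the statement is the Claim_ definition above) =====
theorem find_length_n_paths_spec : Claim_equal_find_length_n_paths := by
  unfold Claim_equal_find_length_n_paths
  intro n board words _ _
  unfold Spec_find_length_n_paths find_length_n_paths find_length_n_paths_alt
  by_cases hn : n = 0
  · rw [if_pos hn, if_pos hn]
  rw [if_neg hn, if_neg hn]
  simp only []
  set K := board.length * board.length with hK
  set sub := creats_sub_words_set words with hsub
  set size : Int := (board.length : Int) with hsize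
  set stack := (PySem.List.pyRange 0 size 1).flatMap (fun r =>
      (PySem.List.pyRange 0 size 1).map (fun c => [(r, c)])) with hstack
  -- normalize A's two nested loops into a flatMap
  rw [PySem.List.foldl_congr_mem' _ _
    (fun paths row => paths ++ (PySem.List.pyRange 0 size 1).flatMap (fun col =>
      pvHelperA (K + 1) n board (row, col) sub words [(row, col)]))
    _ (fun row _ paths => PySem.List.foldl_append_eq_flatMap _ _ _)]
  rw [PySem.List.foldl_append_eq_flatMap, List.nil_append]
  -- evaluate B's stack loop
  have hmem_stack : ∀ p ∈ stack, pvInv board p := by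
    intro p hp
    rw [hstack] at hp
    obtain ⟨r, hr, hp⟩ := List.mem_flatMap.1 hp
    obtain ⟨c, hc, rfl⟩ := List.mem_map.1 hp
    rw [PySem.List.mem_pyRange_one] at hr hc
    exact ⟨by simp, List.nodup_singleton _, by
      intro t ht; simp at ht; subst ht; exact ⟨hr.1, hr.2, hc.1, hc.2⟩⟩
  have hstack_len : stack.length = K := by
    rw [hstack]
    simp only [List.length_flatMap, List.length_map, PySem.List.length_pyRange_one,
      List.map_const', List.sum_replicate, smul_eq_mul, hK, hsize]
    simp
  have hsum : (stack.map (fun p => 9 ^ (K + 1 - p.length))).sum ≤ K * 9 ^ K := by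
    calc (stack.map (fun p => 9 ^ (K + 1 - p.length))).sum
        ≤ (stack.map (fun p => 9 ^ (K + 1 - p.length))).length * 9 ^ K := by
          apply List.sum_le_card_nsmul
          intro q hq
          obtain ⟨p, hp, rfl⟩ := List.mem_map.1 hq
          have hpos : 1 ≤ p.length := List.length_pos_iff.mpr (hmem_stack p hp).1
          apply Nat.pow_le_pow_right (by norm_num)
          omega
      _ = K * 9 ^ K := by rw [List.length_map, hstack_len]
  rw [pvRunB_eq n board words (K * 9 ^ K) stack hmem_stack hsum]
  -- both sides are now the same flatMap over the start cells
  rw [← List.flatMap_def, hstack, List.flatMap_assoc]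
  apply List.flatMap_congr
  intro r hr
  rw [List.flatMap_map]
  apply List.flatMap_congr
  intro c hc
  simp only [pvDfs, PySem.List.pyGet?_neg_one, List.getLast?_singleton,
    Option.getD_some, ← hsub, ← hK]
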